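-- pv_equiv track=rewrite | github.com/okay-at-programming/aoc | aoc-2015/d24/d24-b.py | find_adds
-- ===== SOURCE A (Python) =====
-- def find_adds(t,s,a,b,c):
--     if t == sum(a) and t == sum(b) and t == sum(c):
--         return True
--
--     for j in range(s,len(c)):
--         na = list(a)
--         na.append(c[j])
--         nb = list(b)
--         nc = c[:j] + c[j+1:]
--         if find_adds(t,j,na,nb,nc):
--             return True
--
--         na = list(a)
--         nb = list(b)
--         nb.append(c[j])
--         nc = c[:j] + c[j+1:]
--         if find_adds(t,j,na,nb,nc):
--             return True
--
--     return False
-- ===== SOURCE B (Python) =====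
-- def find_adds(t, s, a, b, c):
--     # reachable-pairs subset-sum DP over c[s:] instead of recursion over group choices
--     u = t - sum(a)
--     v = t - sum(b)
--     if sum(c) != t + u + v:
--         return False
--     reach = {(0, 0)}
--     for w in c[s:]:
--         reach = reach | {(x + w, y) for (x, y) in reach} | {(x, y + w) for (x, y) in reach}
--     return (u, v) in reach
-- ===== Notes on version B (the rewrite author's own statement) =====
-- stated objective: alternative
-- what changed: A's two-way branching recursion (try each remaining weight of c[s:] in group a or in group b) is replaced by an iterative subset-sum DP: one pass over c[s:] maintaining the set of attainable (sum-added-to-a, sum-added-to-b) pairs, plus an upfront total-sum feasibility check that rejects non-3t inputs immediately.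
-- outside the precondition, e.g. on find_adds(1, -2, [], [1], [1, 1]): A returns True, B returns True; on find_adds(1, -1, [1], [1], [1]): A returns True, B returns True
import Mathlib
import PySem

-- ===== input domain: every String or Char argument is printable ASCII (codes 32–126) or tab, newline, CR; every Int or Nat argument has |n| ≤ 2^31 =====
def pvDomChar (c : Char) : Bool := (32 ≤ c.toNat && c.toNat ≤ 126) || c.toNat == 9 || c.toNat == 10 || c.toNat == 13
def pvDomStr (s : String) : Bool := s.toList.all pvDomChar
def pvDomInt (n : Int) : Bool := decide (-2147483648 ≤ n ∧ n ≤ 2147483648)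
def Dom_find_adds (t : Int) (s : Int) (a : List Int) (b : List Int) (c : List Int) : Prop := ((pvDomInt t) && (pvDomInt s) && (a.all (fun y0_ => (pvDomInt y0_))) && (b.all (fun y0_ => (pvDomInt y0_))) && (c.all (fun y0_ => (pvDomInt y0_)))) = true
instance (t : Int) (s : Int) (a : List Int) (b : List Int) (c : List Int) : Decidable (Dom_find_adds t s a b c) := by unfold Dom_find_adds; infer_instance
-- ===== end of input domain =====

-- B replaces A's two-way branching recursion by an iterative reachable-(sumA,sumB)-pairs set DP over c[s:] with an upfront total-sum check (objective: alternative algorithm); no argument is mutated.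

-- ===== PORT A =====
-- literal port of A; the 'if h : …' guards only make the well-founded recursion total
-- (for 0 ≤ s every loop index j satisfies 0 ≤ j < c.length, so the guard always holds there)
def find_adds (t : Int) (s : Int) (a : List Int) (b : List Int) (c : List Int) : Bool :=
  if t = a.sum ∧ t = b.sum ∧ t = c.sum then true
  else
    (PySem.List.pyRange s (c.length : Int) 1).any (fun j =>
      let cj : Int := PySem.List.pyGetD c j 0   -- c[j]; in range whenever 0 ≤ s (Pre_)
      let nc : List Int := PySem.List.slice c none (some j) ++ PySem.List.slice c (some (j + 1)) none
      (if h : nc.length < c.length then find_adds t j (a ++ [cj]) b nc else false) ||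
      (if h : nc.length < c.length then find_adds t j a (b ++ [cj]) nc else false))
termination_by c.length
decreasing_by all_goals exact h

-- ===== PORT B =====
-- reach = reach | {(x+w,y) …} | {(x,y+w) …}  (one DP step)
def dpStep (R : PySem.Set (Int × Int)) (w : Int) : PySem.Set (Int × Int) :=
  PySem.Set.union
    (PySem.Set.union R (PySem.Set.ofList (R.map (fun p => (p.1 + w, p.2)))))
    (PySem.Set.ofList (R.map (fun p => (p.1, p.2 + w))))

def find_adds_alt (t : Int) (s : Int) (a : List Int) (b : List Int) (c : List Int) : Bool :=
  let u := t - a.sum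
  let v := t - b.sum
  if c.sum ≠ t + u + v then false
  else
    let reach := (PySem.List.slice c (some s) none).foldl dpStep
      (PySem.Set.ofList [((0 : Int), (0 : Int))])
    PySem.Set.contains reach (u, v)

-- ===== PRECONDITION & SPEC =====
-- Pre_ restricts to the natural domain 0 ≤ s (s is a start index into c): for negative s A's
-- negative-index wraparound duplicates list elements and on most such inputs A ends in
-- IndexError or RecursionError; the few returning cases are artefacts of that wraparound.
def Pre_find_adds (t : Int) (s : Int) (a : List Int) (b : List Int) (c : List Int) : Prop := 0 ≤ s
instance (t : Int) (s : Int) (a : List Int) (b : List Int) (c : List Int) : Decidable (Pre_find_adds t s a b c) := by unfold Pre_find_adds; infer_instance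
def pvWitness_find_adds : Int × Int × List Int × List Int × List Int := (2, 0, [], [], [1, 1, 2, 2])
def Spec_find_adds (t : Int) (s : Int) (a : List Int) (b : List Int) (c : List Int) (out : Bool) : Prop := out = find_adds_alt t s a b c
instance (t : Int) (s : Int) (a : List Int) (b : List Int) (c : List Int) (out : Bool) : Decidable (Spec_find_adds t s a b c out) := by unfold Spec_find_adds; infer_instance

-- ===== CLAIM (what is proved, stated in full; the proofs are below) =====
def Claim_equal_find_adds : Prop := ∀ (t : Int) (s : Int) (a : List Int) (b : List Int) (c : List Int), Dom_find_adds t s a b c → Pre_find_adds t s a b c → Spec_find_adds t s a b c (find_adds t s a b c)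

-- ===== LEMMAS AND PROOFS =====

-- goodPair u v l : some two disjoint-by-position sub-lists of l sum to u and to v
def goodPair : Int → Int → List Int → Bool
  | u, v, [] => u == 0 && v == 0
  | u, v, w :: l => goodPair (u - w) v l || goodPair u (v - w) l || goodPair u v l

theorem goodPair_zero (l : List Int) : goodPair 0 0 l = true := by
  induction l with
  | nil => simp [goodPair]
  | cons w l ih => simp [goodPair, ih]

theorem mem_dpStep (R : PySem.Set (Int × Int)) (w : Int) (q : Int × Int) :
    q ∈ dpStep R w ↔ q ∈ R ∨ (∃ r ∈ R, q = (r.1 + w, r.2)) ∨ (∃ r ∈ R, q = (r.1, r.2 + w)) := by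
  simp only [dpStep, PySem.Set.mem_union, PySem.Set.mem_ofList, List.mem_map]
  constructor
  · rintro ((h | ⟨r, hr, rfl⟩) | ⟨r, hr, rfl⟩)
    · exact Or.inl h
    · exact Or.inr (Or.inl ⟨r, hr, rfl⟩)
    · exact Or.inr (Or.inr ⟨r, hr, rfl⟩)
  · rintro (h | ⟨r, hr, rfl⟩ | ⟨r, hr, rfl⟩)
    · exact Or.inl (Or.inl h)
    · exact Or.inl (Or.inr ⟨r, hr, rfl⟩)
    · exact Or.inr ⟨r, hr, rfl⟩

theorem mem_foldl_dpStep (l : List Int) : ∀ (R : PySem.Set (Int × Int)) (p : Int × Int),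
    p ∈ l.foldl dpStep R ↔ ∃ q ∈ R, goodPair (p.1 - q.1) (p.2 - q.2) l = true := by
  induction l with
  | nil =>
    intro R p
    simp only [List.foldl_nil, goodPair]
    constructor
    · intro hp
      exact ⟨p, hp, by simp⟩
    · rintro ⟨q, hq, hgood⟩
      have hg := (Bool.and_eq_true _ _).mp hgood
      have h1 : p.1 = q.1 := by have := hg.1; simp at this; omega
      have h2 : p.2 = q.2 := by have := hg.2; simp at this; omega
      have : p = q := Prod.ext h1 h2
      rwa [this]
  | cons w l ih =>
    intro R p
    rw [List.foldl_cons, ih]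
    constructor
    · rintro ⟨q, hq, hgood⟩
      rcases (mem_dpStep R w q).mp hq with h | ⟨r, hr, rfl⟩ | ⟨r, hr, rfl⟩
      · exact ⟨q, h, by simp [goodPair, hgood]⟩
      · refine ⟨r, hr, ?_⟩
        have : p.1 - r.1 - w = p.1 - (r.1 + w) := by ring
        simp [goodPair, this, hgood]
      · refine ⟨r, hr, ?_⟩
        have : p.2 - r.2 - w = p.2 - (r.2 + w) := by ring
        simp [goodPair, this, hgood]
    · rintro ⟨q, hq, hgood⟩
      have hgood' : (goodPair (p.1 - q.1 - w) (p.2 - q.2) l = true ∨ goodPair (p.1 - q.1) (p.2 - q.2 - w) l = true) ∨ goodPair (p.1 - q.1) (p.2 - q.2) l = true := by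
        simpa [goodPair] using hgood
      rcases hgood' with h | h
      rcases h with h1 | h2
      · refine ⟨(q.1 + w, q.2), (mem_dpStep R w _).mpr (Or.inr (Or.inl ⟨q, hq, rfl⟩)), ?_⟩
        have e : p.1 - (q.1 + w) = p.1 - q.1 - w := by ring
        simpa [e] using h1
      · refine ⟨(q.1, q.2 + w), (mem_dpStep R w _).mpr (Or.inr (Or.inr ⟨q, hq, rfl⟩)), ?_⟩
        have e : p.2 - (q.2 + w) = p.2 - q.2 - w := by ring
        simpa [e] using h2
      · exact ⟨q, (mem_dpStep R w _).mpr (Or.inl hq), h⟩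

theorem goodPair_iff_pick (l : List Int) : ∀ (u v : Int), goodPair u v l = true ↔
    ((u = 0 ∧ v = 0) ∨ ∃ k : Nat, ∃ hk : k < l.length,
      (goodPair (u - l[k]) v (l.drop (k + 1)) = true ∨ goodPair u (v - l[k]) (l.drop (k + 1)) = true)) := by
  induction l with
  | nil =>
    intro u v
    simp only [goodPair, List.length_nil]
    constructor
    · intro h
      have h' := (Bool.and_eq_true _ _).mp h
      exact Or.inl ⟨by simpa using h'.1, by simpa using h'.2⟩
    · rintro (⟨h1, h2⟩ | ⟨k, hk, _⟩)
      · simp [h1, h2]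
      · omega
  | cons w l ih =>
    intro u v
    have lhs : goodPair u v (w :: l) = true ↔
        (goodPair (u - w) v l = true ∨ goodPair u (v - w) l = true) ∨ goodPair u v l = true := by
      simp [goodPair, Bool.or_eq_true]
      try tauto
    rw [lhs, ih u v]
    constructor
    · rintro (h | (h | ⟨k, hk, hp⟩))
      · rcases h with h | h
        · exact Or.inr ⟨0, by simp, by simpa using Or.inl h⟩
        · exact Or.inr ⟨0, by simp, by simpa using Or.inr h⟩
      · exact Or.inl h
      · exact Or.inr ⟨k + 1, by simpa using Nat.succ_lt_succ hk, by simpa using hp⟩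
    · rintro (h | ⟨k, hk, hp⟩)
      · exact Or.inr (Or.inl h)
      · cases k with
        | zero => exact Or.inl (by simpa using hp)
        | succ k =>
          refine Or.inr (Or.inr ⟨k, by simpa using Nat.lt_of_succ_lt_succ hk, by simpa using hp⟩)

theorem goodPair_iff_pickD (l : List Int) (u v : Int) : goodPair u v l = true ↔
    ((u = 0 ∧ v = 0) ∨ ∃ k : Nat, k < l.length ∧
      (goodPair (u - l.getD k 0) v (l.drop (k + 1)) = true ∨
       goodPair u (v - l.getD k 0) (l.drop (k + 1)) = true)) := by
  rw [goodPair_iff_pick]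
  constructor
  · rintro (h | ⟨k, hk, hp⟩)
    · exact Or.inl h
    · exact Or.inr ⟨k, hk, by rwa [List.getD_eq_getElem l 0 hk]⟩
  · rintro (h | ⟨k, hk, hp⟩)
    · exact Or.inl h
    · exact Or.inr ⟨k, hk, by rwa [List.getD_eq_getElem l 0 hk] at hp⟩

-- the loop body of A's port, with slices/pyGetD evaluated for an in-range index j
theorem body_eq (t j : Int) (a b c : List Int) (h0 : 0 ≤ j) (h1 : j < (c.length : Int)) :
    (let cj : Int := PySem.List.pyGetD c j 0
     let nc : List Int := PySem.List.slice c none (some j) ++ PySem.List.slice c (some (j + 1)) none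
     (if h : nc.length < c.length then find_adds t j (a ++ [cj]) b nc else false) ||
     (if h : nc.length < c.length then find_adds t j a (b ++ [cj]) nc else false))
    = (find_adds t j (a ++ [c.getD j.toNat 0]) b (c.take j.toNat ++ c.drop (j.toNat + 1)) ||
       find_adds t j a (b ++ [c.getD j.toNat 0]) (c.take j.toNat ++ c.drop (j.toNat + 1))) := by
  have hjn : j.toNat < c.length := by omega
  have hcj : PySem.List.pyGetD c j 0 = c.getD j.toNat 0 := PySem.List.pyGetD_of_nonneg c 0 h0
  have hs1 : PySem.List.slice c none (some j) = c.take j.toNat := PySem.List.slice_to c h0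
  have hs2 : PySem.List.slice c (some (j + 1)) none = c.drop (j + 1).toNat :=
    PySem.List.slice_from c (by omega)
  have ht : (j + 1).toNat = j.toNat + 1 := by omega
  have hnclen : (c.take j.toNat ++ c.drop (j.toNat + 1)).length < c.length := by
    simp only [List.length_append, List.length_take, List.length_drop]
    omega
  simp only [hcj, hs1, hs2, ht]
  rw [dif_pos hnclen, dif_pos hnclen]

theorem A_char : ∀ (n : Nat) (c : List Int), c.length ≤ n → ∀ (t s : Int) (a b : List Int), 0 ≤ s →
    (find_adds t s a b c = true ↔
      (a.sum + b.sum + c.sum = 3 * t ∧ goodPair (t - a.sum) (t - b.sum) (c.drop s.toNat) = true)) := by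
  intro n
  induction n with
  | zero =>
    intro c hlen t s a b hs
    have hc : c = [] := List.length_eq_zero_iff.mp (Nat.le_zero.mp hlen)
    subst hc
    rw [find_adds]
    rw [PySem.List.pyRange_one_eq_nil (by simpa using hs)]
    simp only [List.any_nil, List.sum_nil, List.drop_nil]
    constructor
    · intro h
      split_ifs at h with hbase
      obtain ⟨h1, h2, h3⟩ := hbase
      refine ⟨by omega, ?_⟩
      have e1 : t - List.sum a = 0 := by omega
      have e2 : t - List.sum b = 0 := by omega
      rw [e1, e2]
      exact goodPair_zero []
    · rintro ⟨h1, h2⟩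
      have h2' : t - a.sum = 0 ∧ t - b.sum = 0 := by simpa [goodPair] using h2
      rw [if_pos ⟨by omega, by omega, by omega⟩]
  | succ n ih =>
    intro c hlen t s a b hs
    rw [find_adds]
    by_cases hbase : t = a.sum ∧ t = b.sum ∧ t = c.sum
    · rw [if_pos hbase]
      obtain ⟨h1, h2, h3⟩ := hbase
      have e1 : t - a.sum = 0 := by omega
      have e2 : t - b.sum = 0 := by omega
      simp [e1, e2, goodPair_zero, show a.sum + b.sum + c.sum = 3 * t by omega]
    · rw [if_neg hbase, List.any_eq_true]
      -- evaluate each recursive call through the induction hypothesis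
      have hcall : ∀ jn : Nat, jn < c.length →
          ((find_adds t jn (a ++ [c.getD jn 0]) b (c.take jn ++ c.drop (jn + 1)) = true ∨
            find_adds t jn a (b ++ [c.getD jn 0]) (c.take jn ++ c.drop (jn + 1)) = true) ↔
           (a.sum + b.sum + c.sum = 3 * t ∧
            (goodPair (t - a.sum - c.getD jn 0) (t - b.sum) (c.drop (jn + 1)) = true ∨
             goodPair (t - a.sum) (t - b.sum - c.getD jn 0) (c.drop (jn + 1)) = true))) := by
        intro jn hjn
        have hnclen : (c.take jn ++ c.drop (jn + 1)).length ≤ n := by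
          simp only [List.length_append, List.length_take, List.length_drop]
          omega
        have h0 : (0 : Int) ≤ (jn : Int) := by positivity
        have i1 := ih (c.take jn ++ c.drop (jn + 1)) hnclen t jn (a ++ [c.getD jn 0]) b h0
        have i2 := ih (c.take jn ++ c.drop (jn + 1)) hnclen t jn a (b ++ [c.getD jn 0]) h0
        have hl : (c.take jn).length = jn := by simp; omega
        have hdrop : (c.take jn ++ c.drop (jn + 1)).drop ((jn : Int)).toNat = c.drop (jn + 1) := by
          rw [Int.toNat_natCast]
          exact List.drop_left' hl
        have hd : c.drop jn = c.getD jn 0 :: c.drop (jn + 1) := by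
          rw [List.getD_eq_getElem c 0 hjn]
          exact List.drop_eq_getElem_cons hjn
        have hsum : (c.take jn ++ c.drop (jn + 1)).sum = c.sum - c.getD jn 0 := by
          have hspl : c.sum = (c.take jn).sum + (c.getD jn 0 + (c.drop (jn + 1)).sum) := by
            conv_lhs => rw [← List.take_append_drop jn c, hd]
            rw [List.sum_append, List.sum_cons]
          simp only [List.sum_append]
          omega
        have ea : (a ++ [c.getD jn 0]).sum = a.sum + c.getD jn 0 := by simp
        have eb : (b ++ [c.getD jn 0]).sum = b.sum + c.getD jn 0 := by simp
        rw [hdrop, hsum, ea] at i1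
        rw [hdrop, hsum, eb] at i2
        have ee1 : t - (a.sum + c.getD jn 0) = t - a.sum - c.getD jn 0 := by ring
        have ee2 : t - (b.sum + c.getD jn 0) = t - b.sum - c.getD jn 0 := by ring
        rw [ee1] at i1
        rw [ee2] at i2
        rw [i1, i2]
        constructor
        · rintro (⟨hA, hgp⟩ | ⟨hA, hgp⟩)
          · exact ⟨by omega, Or.inl hgp⟩
          · exact ⟨by omega, Or.inr hgp⟩
        · rintro ⟨hA, hgp | hgp⟩
          · exact Or.inl ⟨by omega, hgp⟩
          · exact Or.inr ⟨by omega, hgp⟩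
      rw [goodPair_iff_pickD]
      have hgetD : ∀ k : Nat, (c.drop s.toNat).getD k 0 = c.getD (s.toNat + k) 0 := by
        intro k
        simp [List.getD_eq_getElem?_getD, List.getElem?_drop]
      have hdd : ∀ k : Nat, (c.drop s.toNat).drop (k + 1) = c.drop (s.toNat + k + 1) := by
        intro k
        rw [List.drop_drop]
        congr 1
      constructor
      · rintro ⟨j, hjmem, hbody⟩
        obtain ⟨hsj, hjlt⟩ := PySem.List.mem_pyRange_one.mp hjmem
        have hj0 : 0 ≤ j := le_trans hs hsj
        have hjn : j.toNat < c.length := by omega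
        rw [body_eq t j a b c hj0 hjlt] at hbody
        have hjcast : ((j.toNat : Nat) : Int) = j := by omega
        rw [← hjcast] at hbody
        obtain ⟨htot, hpick⟩ := (hcall j.toNat hjn).mp ((Bool.or_eq_true _ _).mp hbody)
        refine ⟨htot, Or.inr ⟨j.toNat - s.toNat, ?_, ?_⟩⟩
        · simp only [List.length_drop]; omega
        · have hk : s.toNat + (j.toNat - s.toNat) = j.toNat := by omega
          rw [hgetD, hdd, hk]
          exact hpick
      · rintro ⟨htot, hpick | hpick⟩
        · exfalso
          obtain ⟨e1, e2⟩ := hpick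
          exact hbase ⟨by omega, by omega, by omega⟩
        · obtain ⟨k, hk, hpk⟩ := hpick
          have hklen : s.toNat + k < c.length := by
            simp only [List.length_drop] at hk
            omega
          refine ⟨((s.toNat + k : Nat) : Int), ?_, ?_⟩
          · rw [PySem.List.mem_pyRange_one]
            constructor
            · omega
            · omega
          · have hj0 : (0 : Int) ≤ ((s.toNat + k : Nat) : Int) := by positivity
            have hjlt : ((s.toNat + k : Nat) : Int) < (c.length : Int) := by
              exact_mod_cast Nat.cast_lt.mpr hklen
            rw [body_eq t _ a b c hj0 hjlt]
            rw [Bool.or_eq_true]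
            apply (hcall ((s.toNat + k : Nat) : Int).toNat (by omega)).mpr
            have htn : ((s.toNat + k : Nat) : Int).toNat = s.toNat + k := by omega
            rw [htn]
            refine ⟨htot, ?_⟩
            rw [hgetD, hdd] at hpk
            exact hpk

theorem B_char (t s : Int) (a b c : List Int) (hs : 0 ≤ s) :
    find_adds_alt t s a b c = true ↔
      (c.sum = t + (t - a.sum) + (t - b.sum) ∧ goodPair (t - a.sum) (t - b.sum) (c.drop s.toNat) = true) := by
  have hslice : PySem.List.slice c (some s) none = c.drop s.toNat := PySem.List.slice_from c hs
  simp only [find_adds_alt, hslice]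
  split_ifs with h
  · constructor
    · intro hf; simp at hf
    · rintro ⟨h1, _⟩; exact absurd h1 h
  · rw [PySem.Set.contains_iff, mem_foldl_dpStep]
    constructor
    · rintro ⟨q, hq, hg⟩
      have hq0 : q = (0, 0) := by simpa [PySem.Set.mem_ofList] using hq
      subst hq0
      exact ⟨not_not.mp h, by simpa using hg⟩
    · rintro ⟨_, hg⟩
      exact ⟨(0, 0), by simp [PySem.Set.mem_ofList], by simpa using hg⟩

-- ===== VERDICT (by name: the statement is the Claim_ definition above) =====
theorem find_adds_spec : Claim_equal_find_adds := by
  intro t s a b c _ hpre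
  unfold Spec_find_adds
  have hA := A_char c.length c le_rfl t s a b hpre
  have hB := B_char t s a b c hpre
  have : find_adds t s a b c = true ↔ find_adds_alt t s a b c = true := by
    rw [hA, hB]
    constructor
    · rintro ⟨h1, h2⟩; exact ⟨by omega, h2⟩
    · rintro ⟨h1, h2⟩; exact ⟨by omega, h2⟩
  cases hx : find_adds t s a b c <;> cases hy : find_adds_alt t s a b c <;> simp_all
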